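-- pv_equiv track=rewrite | github.com/Robertsong111/Nonogram_Project | py/贪心算法.py | compute_ambiguous_cells_with_frequency
-- ===== SOURCE A (Python) =====
-- def compute_ambiguous_cells_with_frequency(solutions, original_grid):
--     freq = {}
--     if not solutions or original_grid is None:
--         return freq
--     m = len(original_grid)
--     n = len(original_grid[0]) if m > 0 else 0
--     for sol in solutions:
--         for i in range(m):
--             for j in range(n):
--                 if sol[i][j] != original_grid[i][j]:
--                     freq[(i,j)] = freq.get((i,j), 0) + 1
--     return freq
-- ===== SOURCE B (Python) =====
-- def compute_ambiguous_cells_with_frequency(solutions, original_grid):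
--     if not solutions or original_grid is None:
--         return {}
--     m = len(original_grid)
--     n = len(original_grid[0]) if m > 0 else 0
--
--     def diff_one(sol):
--         return {(i, j): 1 for i in range(m) for j in range(n)
--                 if sol[i][j] != original_grid[i][j]}
--
--     def merge(left, right):
--         out = dict(left)
--         for cell, cnt in right.items():
--             out[cell] = out.get(cell, 0) + cnt
--         return out
--
--     def solve(sols):
--         if len(sols) == 1:
--             return diff_one(sols[0])
--         mid = len(sols) // 2
--         return merge(solve(sols[:mid]), solve(sols[mid:]))
--
--     return solve(solutions)
-- ===== Notes on version B (the rewrite author's own statement) =====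
-- stated objective: alternative
-- what changed: Replaces A's single sequential triple-loop dict accumulation by divide and conquer: recursively split the solutions list in half, build each half's mismatch-frequency dict (base case: one solution's mismatch dict via a comprehension), and merge the two dicts by adding counts.
import Mathlib
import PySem

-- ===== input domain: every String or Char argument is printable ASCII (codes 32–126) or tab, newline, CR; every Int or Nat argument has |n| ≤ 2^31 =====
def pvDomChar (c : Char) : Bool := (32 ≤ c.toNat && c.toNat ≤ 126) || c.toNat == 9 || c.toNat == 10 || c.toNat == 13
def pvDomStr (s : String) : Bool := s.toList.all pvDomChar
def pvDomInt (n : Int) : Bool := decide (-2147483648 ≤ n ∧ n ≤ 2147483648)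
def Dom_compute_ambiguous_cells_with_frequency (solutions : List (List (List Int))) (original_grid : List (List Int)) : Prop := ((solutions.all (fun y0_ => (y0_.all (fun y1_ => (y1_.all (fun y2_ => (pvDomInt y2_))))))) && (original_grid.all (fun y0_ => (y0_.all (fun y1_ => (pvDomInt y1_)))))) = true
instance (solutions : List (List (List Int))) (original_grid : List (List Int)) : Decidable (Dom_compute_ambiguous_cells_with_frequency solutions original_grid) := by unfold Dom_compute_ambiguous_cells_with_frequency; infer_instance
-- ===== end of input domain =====

-- B replaces A's single triple-loop dict accumulation by divide and conquer: split the solution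
-- list in half, build each half's frequency dict recursively, merge by adding counts (alternative decomposition, same cost class).

-- ===== PORT A =====
def compute_ambiguous_cells_with_frequency (solutions : List (List (List Int))) (original_grid : List (List Int)) : List (Int × Int × Int) :=
  if solutions = [] then []
  else
    let m : Int := PySem.List.len original_grid
    let n : Int := if m > 0 then PySem.List.len (PySem.List.pyGetD original_grid 0 []) else 0
    let freq : PySem.Dict (Int × Int) Int :=
      solutions.foldl (fun d sol =>
        (PySem.List.pyRange 0 m 1).foldl (fun d i =>
          (PySem.List.pyRange 0 n 1).foldl (fun d j =>
            if PySem.List.pyGetD (PySem.List.pyGetD sol i []) j 0 ≠ PySem.List.pyGetD (PySem.List.pyGetD original_grid i []) j 0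
            then d.insert (i, j) (d.getD (i, j) 0 + 1) else d) d) d) PySem.Dict.empty
    freq.items.map (fun p => (p.1.1, p.1.2, p.2))

-- ===== PORT B =====
-- the (i, j) pairs produced by diff_one's comprehension, in its iteration order
def pvDiffList (original_grid : List (List Int)) (m n : Int) (sol : List (List Int)) : List (Int × Int) :=
  (PySem.List.pyRange 0 m 1).flatMap (fun i =>
    ((PySem.List.pyRange 0 n 1).filter (fun j =>
      decide (PySem.List.pyGetD (PySem.List.pyGetD sol i []) j 0 ≠ PySem.List.pyGetD (PySem.List.pyGetD original_grid i []) j 0))).map (fun j => (i, j)))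

-- diff_one: {cell: 1 for each mismatching cell}
def pvDiffOne (original_grid : List (List Int)) (m n : Int) (sol : List (List Int)) : PySem.Dict (Int × Int) Int :=
  (pvDiffList original_grid m n sol).foldl (fun d c => d.insert c 1) PySem.Dict.empty

-- merge: copy of left, then add right's counts into it
def pvMerge (left right : PySem.Dict (Int × Int) Int) : PySem.Dict (Int × Int) Int :=
  right.items.foldl (fun out p => out.insert p.1 (out.getD p.1 0 + p.2)) left

-- solve: divide and conquer over the solution list (the ≤ 1 guard only makes the
-- recursion total; Python never reaches solve([]))
def pvSolve (original_grid : List (List Int)) (m n : Int) (sols : List (List (List Int))) : PySem.Dict (Int × Int) Int :=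
  if sols.length ≤ 1 then pvDiffOne original_grid m n (sols.headD [])
  else
    let mid := sols.length / 2
    pvMerge (pvSolve original_grid m n (sols.take mid)) (pvSolve original_grid m n (sols.drop mid))
termination_by sols.length
decreasing_by
  · simp only [List.length_take]; omega
  · simp only [List.length_drop]; omega

def compute_ambiguous_cells_with_frequency_alt (solutions : List (List (List Int))) (original_grid : List (List Int)) : List (Int × Int × Int) :=
  if solutions = [] then []
  else
    let m : Int := PySem.List.len original_grid
    let n : Int := if m > 0 then PySem.List.len (PySem.List.pyGetD original_grid 0 []) else 0
    (pvSolve original_grid m n solutions).items.map (fun p => (p.1.1, p.1.2, p.2))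

-- ===== PRECONDITION & SPEC =====
-- Pre_ excludes exactly the ragged inputs on which A raises IndexError: when some inner cell is
-- actually accessed (solutions nonempty and n > 0), every original row and the first m rows of every
-- solution must have at least n entries, and every solution at least m rows.
def Pre_compute_ambiguous_cells_with_frequency (solutions : List (List (List Int))) (original_grid : List (List Int)) : Prop :=
  solutions = [] ∨
  (if original_grid = [] then 0 else (original_grid.headD []).length) = 0 ∨
  ((∀ row ∈ original_grid, (original_grid.headD []).length ≤ row.length) ∧
   ∀ sol ∈ solutions, original_grid.length ≤ sol.length ∧
     ∀ row ∈ sol.take original_grid.length, (original_grid.headD []).length ≤ row.length)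
instance (solutions : List (List (List Int))) (original_grid : List (List Int)) : Decidable (Pre_compute_ambiguous_cells_with_frequency solutions original_grid) := by unfold Pre_compute_ambiguous_cells_with_frequency; infer_instance

def pvWitness_compute_ambiguous_cells_with_frequency : List (List (List Int)) × List (List Int) := ([[[1, 0], [0, 1]], [[1, 1], [0, 0]]], [[1, 0], [0, 0]])

def Spec_compute_ambiguous_cells_with_frequency (solutions : List (List (List Int))) (original_grid : List (List Int)) (out : List (Int × Int × Int)) : Prop := out = compute_ambiguous_cells_with_frequency_alt solutions original_grid
instance (solutions : List (List (List Int))) (original_grid : List (List Int)) (out : List (Int × Int × Int)) : Decidable (Spec_compute_ambiguous_cells_with_frequency solutions original_grid out) := by unfold Spec_compute_ambiguous_cells_with_frequency; infer_instance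

-- ===== CLAIM (what is proved, stated in full; the proofs are below) =====
def Claim_equal_compute_ambiguous_cells_with_frequency : Prop := ∀ (solutions : List (List (List Int))) (original_grid : List (List Int)), Dom_compute_ambiguous_cells_with_frequency solutions original_grid → Pre_compute_ambiguous_cells_with_frequency solutions original_grid → Spec_compute_ambiguous_cells_with_frequency solutions original_grid (compute_ambiguous_cells_with_frequency solutions original_grid)

-- ===== LEMMAS AND PROOFS =====

-- a conditional counting loop over l with key k equals the counting loop over the filtered, key-mapped list
theorem pv_foldl_if_count {α κ : Type} [BEq κ] (l : List α) (p : α → Prop) [DecidablePred p] (k : α → κ)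
    (d : PySem.Dict κ Int) :
    l.foldl (fun d x => if p x then d.insert (k x) (d.getD (k x) 0 + 1) else d) d
      = ((l.filter (fun x => decide (p x))).map k).foldl (fun d c => d.insert c (d.getD c 0 + 1)) d := by
  induction l generalizing d with
  | nil => rfl
  | cons x t ih =>
    by_cases hx : p x <;> simp [hx, ih]

-- a nested fold equals the fold over the flatMap
theorem pv_foldl_nested {α β σ : Type} (l : List α) (g : α → List β) (f : σ → β → σ) (s : σ) :
    l.foldl (fun s x => (g x).foldl f s) s = (l.flatMap g).foldl f s := by
  induction l generalizing s with
  | nil => rfl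
  | cons x t ih => simp [List.flatMap_cons, List.foldl_append, ih]

-- getD after a pair-fold that adds each pair's value at its key
theorem pv_getD_foldl_pairs (L : List ((Int × Int) × Int)) (d : PySem.Dict (Int × Int) Int) (v : Int × Int) :
    (L.foldl (fun out p => out.insert p.1 (out.getD p.1 0 + p.2)) d).getD v 0
      = d.getD v 0 + ((L.filter (fun p => p.1 = v)).map (·.2)).sum := by
  induction L generalizing d with
  | nil => simp
  | cons a t ih =>
    simp only [List.foldl_cons, ih, List.filter_cons]
    by_cases h : a.1 = v
    · simp [h]
      ring
    · simp [h, PySem.Dict.getD_insert, Ne.symm h]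

-- updating a set with the deduplicated list is updating with the list
theorem pv_set_update_ofList (s : PySem.Set (Int × Int)) (l : List (Int × Int)) :
    PySem.Set.update s (PySem.Set.ofList l) = PySem.Set.update s l := by
  rw [PySem.Set.update_eq_append_filter, PySem.Set.update_eq_append_filter, PySem.Set.ofList_ofList]

-- two count dicts with Nodup keys, equal key lists and equal counts are equal
theorem pv_dict_ext (d d' : PySem.Dict (Int × Int) Int)
    (h1 : d.keys.Nodup) (h2 : d'.keys.Nodup) (hk : d.keys = d'.keys)
    (hg : ∀ v, d.getD v 0 = d'.getD v 0) : d = d' := by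
  apply PySem.Dict.ext
  rw [PySem.Dict.items_eq_map_keys d h1 0, PySem.Dict.items_eq_map_keys d' h2 0, ← hk]
  exact List.map_congr_left (fun k _ => by rw [hg k])

-- adding a counter's items into d equals counting the underlying list into d one by one
theorem pv_merge_counter (l : List (Int × Int)) (d : PySem.Dict (Int × Int) Int) (hd : d.keys.Nodup) :
    pvMerge d (PySem.Dict.counter l)
      = l.foldl (fun out x => out.insert x (out.getD x 0 + 1)) d := by
  apply pv_dict_ext
  · exact PySem.Dict.nodup_keys_foldl_insert_key _ _ _ _ hd
  · exact PySem.Dict.nodup_keys_foldl_insert _ _ _ hd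
  · rw [pvMerge, PySem.Dict.keys_foldl_insert_key, PySem.Dict.keys_foldl_insert]
    have : (PySem.Dict.counter l).items.map (·.1) = PySem.Dict.keys (PySem.Dict.counter l) := rfl
    rw [this, PySem.Dict.keys_counter, pv_set_update_ofList]
  · intro v
    rw [pvMerge, pv_getD_foldl_pairs, PySem.Dict.getD_foldl_insert_add_one, PySem.Dict.items_counter]
    congr 1
    rw [List.filter_map]
    have hfc : ((fun p => decide (p.1 = v)) ∘ fun k => (k, (l.count k : Int))) = fun k => decide (k = v) := by
      funext k; simp
    rw [hfc]
    by_cases hv : v ∈ PySem.Set.ofList l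
    · have hnd := PySem.Set.nodup_ofList (xs := l)
      have : (PySem.Set.ofList l).filter (fun k => decide (k = v)) = [v] := by
        rw [List.filter_eq]
        rw [List.count_eq_one_of_mem hnd hv]
        rfl
      simp [this]
    · have : (PySem.Set.ofList l).filter (fun k => decide (k = v)) = [] := by
        rw [List.filter_eq]
        rw [List.count_eq_zero_of_not_mem hv]
        rfl
      have hv' : v ∉ l := fun h => hv ((PySem.Set.mem_ofList _ _).mpr h)
      simp [this, List.count_eq_zero_of_not_mem hv']

-- the mismatch list of one solution has no duplicate cells
theorem pv_nodup_diffList (original_grid : List (List Int)) (m n : Int) (sol : List (List Int)) :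
    (pvDiffList original_grid m n sol).Nodup := by
  rw [pvDiffList, List.nodup_flatMap]
  refine ⟨fun i _ => ?_, ?_⟩
  · exact List.Nodup.map (fun a b h => by simpa using h)
      (((PySem.List.nodup_pyRange_one 0 n)).filter _)
  · refine (PySem.List.nodup_pyRange_one 0 m).imp ?_
    intro i i' hne x hx hx'
    simp only [List.mem_map, List.mem_filter] at hx hx'
    obtain ⟨j, _, rfl⟩ := hx
    obtain ⟨j', _, hj'⟩ := hx'
    exact hne (by simpa using congrArg Prod.fst hj'.symm)

-- getD after a fold inserting constant 1 at each element
theorem pv_getD_foldl_insert_one (l : List (Int × Int)) (d : PySem.Dict (Int × Int) Int) (v : Int × Int) :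
    (l.foldl (fun d c => d.insert c 1) d).getD v 0 = if v ∈ l then 1 else d.getD v 0 := by
  induction l generalizing d with
  | nil => simp
  | cons x t ih =>
    simp only [List.foldl_cons, ih, PySem.Dict.getD_insert, List.mem_cons]
    by_cases hv : v ∈ t <;> by_cases hx : v = x <;> simp [hv, hx]

-- diff_one builds the counter of the mismatch list
theorem pv_diffOne_eq_counter (original_grid : List (List Int)) (m n : Int) (sol : List (List Int)) :
    pvDiffOne original_grid m n sol = PySem.Dict.counter (pvDiffList original_grid m n sol) := by
  have hnd := pv_nodup_diffList original_grid m n sol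
  apply pv_dict_ext
  · exact PySem.Dict.nodup_keys_foldl_insert _ _ _ PySem.Dict.nodup_keys_empty
  · exact PySem.Dict.nodup_keys_counter _
  · rw [pvDiffOne, PySem.Dict.keys_foldl_insert, PySem.Dict.keys_counter, PySem.Dict.keys_empty,
      PySem.Set.update_nil_left]
  · intro v
    rw [pvDiffOne, pv_getD_foldl_insert_one, PySem.Dict.getD_counter]
    by_cases hv : v ∈ pvDiffList original_grid m n sol
    · simp [hv, List.count_eq_one_of_mem hnd hv]
    · simp [hv, List.count_eq_zero_of_not_mem hv]

-- solve computes the counter of all mismatches, in order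
theorem pv_solve_eq_counter (original_grid : List (List Int)) (m n : Int) :
    ∀ sols : List (List (List Int)), sols ≠ [] →
      pvSolve original_grid m n sols = PySem.Dict.counter (sols.flatMap (pvDiffList original_grid m n)) := by
  intro sols
  induction sols using pvSolve.induct with
  | case1 sols h =>
    intro hne
    have h1 : sols.length = 1 := by
      cases sols with
      | nil => exact absurd rfl hne
      | cons a t => simp at h ⊢; omega
    obtain ⟨a, rfl⟩ := List.length_eq_one_iff.mp h1
    rw [pvSolve]
    simp [pv_diffOne_eq_counter]
  | case2 sols h mid ih1 ih2 =>
    intro _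
    have ht : sols.take (sols.length / 2) ≠ [] := by
      intro hc
      have h' := congrArg List.length hc
      rw [List.length_take] at h'
      simp only [List.length_nil] at h'
      omega
    have hd : sols.drop (sols.length / 2) ≠ [] := by
      intro hc
      have h' := congrArg List.length hc
      rw [List.length_drop] at h'
      simp only [List.length_nil] at h'
      omega
    rw [pvSolve]
    simp only [if_neg h]
    rw [ih1 ht, ih2 hd, pv_merge_counter _ _ (PySem.Dict.nodup_keys_counter _),
      ← PySem.Dict.foldl_insert_getD_add_one_eq_counter, ← List.foldl_append,
      PySem.Dict.foldl_insert_getD_add_one_eq_counter, ← List.flatMap_append,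
      List.take_append_drop]

-- ===== VERDICT (by name: the statement is the Claim_ definition above) =====
theorem compute_ambiguous_cells_with_frequency_spec : Claim_equal_compute_ambiguous_cells_with_frequency := by
  intro solutions original_grid _ _
  unfold Spec_compute_ambiguous_cells_with_frequency
  unfold compute_ambiguous_cells_with_frequency compute_ambiguous_cells_with_frequency_alt
  by_cases hs : solutions = []
  · simp [hs]
  · simp only [hs, reduceIte]
    have h1 : ∀ (sol : List (List Int)) (i : Int) (d : PySem.Dict (Int × Int) Int),
        (PySem.List.pyRange 0 (if PySem.List.len original_grid > 0 then PySem.List.len (PySem.List.pyGetD original_grid 0 []) else 0) 1).foldl (fun d j =>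
            if PySem.List.pyGetD (PySem.List.pyGetD sol i []) j 0 ≠ PySem.List.pyGetD (PySem.List.pyGetD original_grid i []) j 0
            then d.insert (i, j) (d.getD (i, j) 0 + 1) else d) d
          = (((PySem.List.pyRange 0 (if PySem.List.len original_grid > 0 then PySem.List.len (PySem.List.pyGetD original_grid 0 []) else 0) 1).filter (fun j =>
              decide (PySem.List.pyGetD (PySem.List.pyGetD sol i []) j 0 ≠ PySem.List.pyGetD (PySem.List.pyGetD original_grid i []) j 0))).map (fun j => ((i : Int), j))).foldl
              (fun d c => d.insert c (d.getD c 0 + 1)) d := by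
      intro sol i d
      exact pv_foldl_if_count _ _ _ d
    simp only [h1]
    simp only [pv_foldl_nested]
    rw [PySem.Dict.foldl_insert_getD_add_one_eq_counter]
    rw [pv_solve_eq_counter _ _ _ _ hs]
    rfl
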